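-- pv_equiv track=rewrite | github.com/lugasyk/CodingBatPython_1 | list_2.py | string_match
-- ===== SOURCE A (Python) =====
-- def string_match(a, b):
--   shortlen = min(len(a), len(b))
--   count = 0
--   for i in range(shortlen-1):
--     a_sub = a[i:i+2]
--     b_sub = b[i:i+2]
--     if  a_sub == b_sub:
--       count = count +1
--   return count
-- ===== SOURCE B (Python) =====
-- def string_match(a, b):
--     # mask of per-position single-char matches, then count adjacent True pairs
--     mask = [x == y for x, y in zip(a, b)]
--     return sum(1 for p, q in zip(mask, mask[1:]) if p and q)
-- ===== Notes on version B (the rewrite author's own statement) =====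
-- stated objective: alternative
-- what changed: Replaces the slice-and-compare loop with a per-position character-equality mask followed by counting adjacent pairs of matches via zip(mask, mask[1:]).
import Mathlib
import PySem

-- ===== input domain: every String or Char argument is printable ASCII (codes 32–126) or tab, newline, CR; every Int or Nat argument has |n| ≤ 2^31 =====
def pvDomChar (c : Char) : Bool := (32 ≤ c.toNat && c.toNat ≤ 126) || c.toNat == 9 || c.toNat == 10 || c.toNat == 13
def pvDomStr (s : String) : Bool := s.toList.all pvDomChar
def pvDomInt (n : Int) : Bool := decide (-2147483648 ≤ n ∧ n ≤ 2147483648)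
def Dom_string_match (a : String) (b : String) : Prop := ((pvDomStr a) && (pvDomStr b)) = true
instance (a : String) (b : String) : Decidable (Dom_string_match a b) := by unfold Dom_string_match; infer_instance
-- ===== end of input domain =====

-- B replaces A's aligned 2-char-slice comparison loop by a per-position character-equality
-- mask followed by counting adjacent pairs of matches (objective: alternative decomposition).

-- ===== PORT A =====
def string_match (a : String) (b : String) : Int :=
  let shortlen : Int := min (PySem.Str.len a) (PySem.Str.len b)
  (PySem.List.pyRange 0 (shortlen - 1) 1).foldl
    (fun count i =>
      let a_sub := PySem.List.slice a.toList (some i) (some (i + 2))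
      let b_sub := PySem.List.slice b.toList (some i) (some (i + 2))
      if a_sub == b_sub then count + 1 else count) 0

-- ===== PORT B =====
def string_match_alt (a : String) (b : String) : Int :=
  let mask : List Bool := (a.toList.zip b.toList).map (fun p => p.1 == p.2)
  ((mask.zip mask.tail).map (fun p => if p.1 && p.2 then (1 : Int) else 0)).sum

-- ===== PRECONDITION & SPEC =====
def Spec_string_match (a : String) (b : String) (out : Int) : Prop := out = string_match_alt a b
instance (a : String) (b : String) (out : Int) : Decidable (Spec_string_match a b out) := by unfold Spec_string_match; infer_instance

-- ===== CLAIM (what is proved, stated in full; the proofs are below) =====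
def Claim_equal_string_match : Prop := ∀ (a : String) (b : String), Dom_string_match a b → Spec_string_match a b (string_match a b)

-- ===== LEMMAS AND PROOFS =====

-- two-element window of a list at k, as A's slice sees it
lemma take_two_drop {α : Type} (xs : List α) (k : Nat) (h : k + 1 < xs.length) :
    (xs.drop k).take 2 = [xs[k], xs[k+1]] := by
  rw [show xs.drop k = xs[k]'(by omega) :: xs.drop (k+1) from List.drop_eq_getElem_cons (by omega)]
  rw [show xs.drop (k+1) = xs[k+1] :: xs.drop (k+2) from List.drop_eq_getElem_cons h]
  rfl

lemma string_match_eq_alt (a b : String) : string_match a b = string_match_alt a b := by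
  unfold string_match string_match_alt
  set xs := a.toList with hxs
  set ys := b.toList with hys
  simp only [PySem.Str.len_eq]
  set n : Nat := min xs.length ys.length with hn
  have hmin : min (xs.length : Int) (ys.length : Int) = (n : Int) := by
    simp [hn]
  rw [hmin, PySem.List.foldl_count_if]
  set mask : List Bool := (xs.zip ys).map (fun p => p.1 == p.2) with hmask
  have hmlen : mask.length = n := by simp [hmask, hn]
  rw [PySem.List.sum_map_ite_one_zero]
  -- both sides are countP's; relate them through the mapped Bool lists
  have key : (PySem.List.pyRange 0 ((n : Int) - 1) 1).map
        (fun i => PySem.List.slice xs (some i) (some (i + 2)) ==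
                  PySem.List.slice ys (some i) (some (i + 2)))
      = (mask.zip mask.tail).map (fun p => p.1 && p.2) := by
    apply List.ext_getElem
    · simp [PySem.List.length_pyRange_one, hmlen]
    · intro k h1 h2
      simp only [PySem.List.pyRange_one, List.map_map, List.length_map, List.length_range] at h1 ⊢
      have hk : k < n - 1 := by omega
      have hkx : k + 1 < xs.length := by omega
      have hky : k + 1 < ys.length := by omega
      simp only [List.getElem_map, List.getElem_range, List.getElem_zip, Function.comp_apply,
        List.getElem_tail]
      have e1 : PySem.List.slice xs (some (0 + (k:Int))) (some (0 + (k:Int) + 2)) = [xs[k], xs[k+1]] := by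
        rw [PySem.List.slice_toNat xs (by omega) (by omega)]
        have h2' : ((0 + (k:Int) + 2).toNat) = k + 2 := by omega
        have h1' : ((0 + (k:Int)).toNat) = k := by omega
        rw [h1', h2']
        have : k + 2 - k = 2 := by omega
        rw [this, take_two_drop xs k hkx]
      have e2 : PySem.List.slice ys (some (0 + (k:Int))) (some (0 + (k:Int) + 2)) = [ys[k], ys[k+1]] := by
        rw [PySem.List.slice_toNat ys (by omega) (by omega)]
        have h2' : ((0 + (k:Int) + 2).toNat) = k + 2 := by omega
        have h1' : ((0 + (k:Int)).toNat) = k := by omega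
        rw [h1', h2']
        have : k + 2 - k = 2 := by omega
        rw [this, take_two_drop ys k hky]
      rw [e1, e2]
      have hmk : ∀ j (hj : j < n), mask[j]'(by omega) = (xs[j]'(by omega) == ys[j]'(by omega)) := by
        intro j hj
        simp [hmask]
      rw [hmk k (by omega), hmk (k+1) (by omega)]
      simp
  calc ((0:Int) + (List.countP
          (fun i => PySem.List.slice xs (some i) (some (i + 2)) ==
                    PySem.List.slice ys (some i) (some (i + 2)))
          (PySem.List.pyRange 0 ((n : Int) - 1) 1) : Nat))
      = (List.countP id ((PySem.List.pyRange 0 ((n : Int) - 1) 1).map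
          (fun i => PySem.List.slice xs (some i) (some (i + 2)) ==
                    PySem.List.slice ys (some i) (some (i + 2)))) : Nat) := by
        rw [List.countP_map]; simp
    _ = (List.countP id ((mask.zip mask.tail).map (fun p => p.1 && p.2)) : Nat) := by rw [key]
    _ = (List.countP (fun p => p.1 && p.2) (mask.zip mask.tail) : Nat) := by
        rw [List.countP_map]; simp

-- ===== VERDICT (by name: the statement is the Claim_ definition above) =====
theorem string_match_spec : Claim_equal_string_match := by
  intro a b _
  unfold Spec_string_match
  exact string_match_eq_alt a b
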